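-- pv_equiv track=rewrite | github.com/vigneshv-i/Tiger-Analytics-Assignment | python-fundamentals-19-03-25.py | pattern_a
-- ===== SOURCE A (Python) =====
-- def pattern_a(rows):
--     num = 1
--     result = []
--     for i in range(1, rows + 1):
--         row = []
--         for j in range(1, 2*i):
--             row.append(str(num) if j % 2 == 1 else '*')
--             if j % 2 == 1:
--                 num += 1
--         result.append(' '.join(row))
--     return '\n'.join(result)
-- ===== SOURCE B (Python) =====
-- def pattern_a(rows):
--     lines = []
--     for i in range(1, rows + 1):
--         start = i * (i - 1) // 2 + 1
--         lines.append(' * '.join(str(n) for n in range(start, start + i)))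
--     return '\n'.join(lines)
-- ===== Notes on version B (the rewrite author's own statement) =====
-- stated objective: simpler
-- what changed: Replaced the threaded running-number accumulator and the inner per-position loop with parity checks by a closed-form triangular-number starting index for each row and a star-separator join over that row's consecutive numbers.
import Mathlib
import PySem

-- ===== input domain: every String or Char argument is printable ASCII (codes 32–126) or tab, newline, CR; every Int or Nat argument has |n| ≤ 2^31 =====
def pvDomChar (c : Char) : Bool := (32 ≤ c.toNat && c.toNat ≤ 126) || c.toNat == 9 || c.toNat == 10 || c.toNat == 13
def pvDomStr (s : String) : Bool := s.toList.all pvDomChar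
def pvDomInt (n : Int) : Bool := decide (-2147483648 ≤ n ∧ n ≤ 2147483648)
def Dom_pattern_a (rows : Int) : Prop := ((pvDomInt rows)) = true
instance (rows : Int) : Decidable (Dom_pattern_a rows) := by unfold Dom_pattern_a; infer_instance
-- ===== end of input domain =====

-- B replaces A's threaded number accumulator and inner position loop with a closed-form
-- triangular-number starting index per row and a star-separator join over the row's numbers (objective: simpler).

-- ===== PORT A =====
def pattern_a (rows : Int) : String :=
  let st :=
    (PySem.List.pyRange 1 (rows + 1) 1).foldl
      (fun (st : Int × List String) i =>
        let inner :=
          (PySem.List.pyRange 1 (2 * i) 1).foldl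
            (fun (st2 : Int × List String) j =>
              let row := st2.2 ++ [if PySem.Int.mod j 2 = 1 then PySem.Int.toStr st2.1 else "*"]
              let num := if PySem.Int.mod j 2 = 1 then st2.1 + 1 else st2.1
              (num, row))
            (st.1, [])
        (inner.1, st.2 ++ [PySem.Str.join " " inner.2]))
      (1, ([] : List String))
  PySem.Str.join "\n" st.2

-- ===== PORT B =====
def pattern_a_alt (rows : Int) : String :=
  PySem.Str.join "\n"
    ((PySem.List.pyRange 1 (rows + 1) 1).map (fun i =>
      let start := PySem.Int.floordiv (i * (i - 1)) 2 + 1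
      PySem.Str.join " * " ((PySem.List.pyRange start (start + i) 1).map PySem.Int.toStr)))

-- ===== PRECONDITION & SPEC =====
def Spec_pattern_a (rows : Int) (out : String) : Prop := out = pattern_a_alt rows
instance (rows : Int) (out : String) : Decidable (Spec_pattern_a rows out) := by unfold Spec_pattern_a; infer_instance

-- ===== CLAIM (what is proved, stated in full; the proofs are below) =====
def Claim_equal_pattern_a : Prop := ∀ (rows : Int), Dom_pattern_a rows → Spec_pattern_a rows (pattern_a rows)

-- ===== LEMMAS AND PROOFS =====
theorem my_map_intersperse {α β : Type} (f : α → β) (y : α) : ∀ (l : List α),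
    (List.intersperse y l).map f = List.intersperse (f y) (l.map f) := by
  intro l
  induction l with
  | nil => rfl
  | cons a t ih =>
    cases t with
    | nil => rfl
    | cons b t' => simp only [List.intersperse, List.map_cons] at ih ⊢; simp [ih]

theorem intersperse_append_two {α : Type} (y x : α) : ∀ (l : List α), l ≠ [] →
    List.intersperse y (l ++ [x]) = List.intersperse y l ++ [y, x] := by
  intro l
  induction l with
  | nil => intro h; exact absurd rfl h
  | cons a t ih =>
    intro _
    cases t with
    | nil => simp [List.intersperse]
    | cons b t' =>
      have h1 : (a :: b :: t') ++ [x] = a :: b :: (t' ++ [x]) := by simp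
      rw [h1]
      have h2 : List.intersperse y (a :: b :: (t' ++ [x])) = a :: y :: List.intersperse y (b :: (t' ++ [x])) := by
        simp [List.intersperse]
      rw [h2, show b :: (t' ++ [x]) = (b :: t') ++ [x] by simp, ih (by simp)]
      simp [List.intersperse]

theorem join_inter : ∀ (L : List (List Char)),
    PySem.Chars.join [' '] (List.intersperse ['*'] L) = PySem.Chars.join [' ', '*', ' '] L := by
  intro L
  induction L with
  | nil => rfl
  | cons a t ih =>
    cases t with
    | nil => rfl
    | cons b t' =>
      have h1 : List.intersperse ['*'] (a :: b :: t') = a :: ['*'] :: List.intersperse ['*'] (b :: t') := by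
        simp [List.intersperse]
      rw [h1, PySem.Chars.join_cons_cons, PySem.Chars.join_cons_cons _ a b t', ← ih]
      cases t' with
      | nil => simp [List.intersperse, PySem.Chars.join_singleton, PySem.Chars.join_cons_cons]
      | cons c t'' =>
        have h2 : List.intersperse ['*'] (b :: c :: t'') = b :: ['*'] :: List.intersperse ['*'] (c :: t'') := by
          simp [List.intersperse]
        rw [h2, PySem.Chars.join_cons_cons]
        simp

theorem mod_two_of_even (k : Int) : PySem.Int.mod (2*k+2) 2 = 0 := by
  rw [PySem.Int.mod_eq_emod_of_pos (by omega)]; omega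

theorem mod_two_of_odd (k : Int) : PySem.Int.mod (2*k+1) 2 = 1 := by
  rw [PySem.Int.mod_eq_emod_of_pos (by omega)]; omega

theorem inner_eq (k : Nat) : ∀ num : Int,
    (PySem.List.pyRange 1 (2*((k:Int)+1)) 1).foldl
      (fun (st2 : Int × List String) j =>
        let row := st2.2 ++ [if PySem.Int.mod j 2 = 1 then PySem.Int.toStr st2.1 else "*"]
        let num := if PySem.Int.mod j 2 = 1 then st2.1 + 1 else st2.1
        (num, row))
      (num, [])
    = (num + ((k:Int)+1),
       List.intersperse "*" ((PySem.List.pyRange num (num + ((k:Int)+1)) 1).map PySem.Int.toStr)) := by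
  induction k with
  | zero =>
    intro num
    rw [show (2*(((0:Nat):Int)+1)) = (1:Int)+1 by norm_num, PySem.List.pyRange_one_singleton,
       show num + (((0:Nat):Int)+1) = num + 1 by norm_num, PySem.List.pyRange_one_singleton]
    simp
  | succ k ih =>
    intro num
    have h1 : PySem.List.pyRange 1 (2*(((k:Nat)+1:Int)+1)) 1
        = PySem.List.pyRange 1 (2*((k:Int)+1)) 1 ++ [2*((k:Int)+1)] ++ [2*((k:Int)+1)+1] := by
      rw [show (2*(((k:Nat):Int)+1+1)) = (2*((k:Int)+1)+1) + 1 by ring,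
          PySem.List.pyRange_one_succ_right (by omega),
          PySem.List.pyRange_one_succ_right (by omega)]
    push_cast at h1 ⊢
    rw [h1, List.foldl_append, List.foldl_append]
    have ih' := ih num
    push_cast at ih'
    rw [ih']
    have hm0 : PySem.Int.mod (2*((k:Int)+1)) 2 = 0 := by
      have := mod_two_of_even (k:Int); rw [show 2*((k:Int))+2 = 2*((k:Int)+1) by ring] at this; exact this
    have hm1 : PySem.Int.mod (2*((k:Int)+1)+1) 2 = 1 := by
      have := mod_two_of_odd ((k:Int)+1); rw [show 2*((k:Int)+1)+1 = 2*((k:Int)+1)+1 by ring] at this; exact this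
    simp only [List.foldl_cons, List.foldl_nil, hm0, hm1]
    norm_num
    have hr : PySem.List.pyRange num (num + ((k:Int)+1+1)) 1
        = PySem.List.pyRange num (num + ((k:Int)+1)) 1 ++ [num + ((k:Int)+1)] := by
      rw [show num + ((k:Int)+1+1) = (num + ((k:Int)+1)) + 1 by ring,
          PySem.List.pyRange_one_succ_right (by omega)]
    have hne : List.map PySem.Int.toStr (PySem.List.pyRange num (num + ((k:Int) + 1)) 1) ≠ [] := by
      intro h
      have := congrArg List.length h
      simp [PySem.List.length_pyRange_one] at this
    push_cast at hne
    rw [hr, List.map_append]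
    refine ⟨by omega, ?_⟩
    rw [show List.map PySem.Int.toStr [num + ((k:Int)+1)] = [PySem.Int.toStr (num + ((k:Int)+1))] from by simp]
    rw [intersperse_append_two _ _ _ hne]

-- lift of join_inter to Str
theorem str_join_inter (l : List String) :
    PySem.Str.join " " (List.intersperse "*" l) = PySem.Str.join " * " l := by
  unfold PySem.Str.join
  rw [show (List.intersperse "*" l).map String.toList
        = List.intersperse "*".toList (l.map String.toList) from my_map_intersperse _ _ l]
  rw [show ("*" : String).toList = ['*'] from rfl, show (" " : String).toList = [' '] from rfl,
      show (" * " : String).toList = [' ', '*', ' '] from rfl, join_inter]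

theorem outer_eq (n : Nat) :
    (PySem.List.pyRange 1 ((n:Int) + 1) 1).foldl
      (fun (st : Int × List String) i =>
        let inner :=
          (PySem.List.pyRange 1 (2 * i) 1).foldl
            (fun (st2 : Int × List String) j =>
              let row := st2.2 ++ [if PySem.Int.mod j 2 = 1 then PySem.Int.toStr st2.1 else "*"]
              let num := if PySem.Int.mod j 2 = 1 then st2.1 + 1 else st2.1
              (num, row))
            (st.1, [])
        (inner.1, st.2 ++ [PySem.Str.join " " inner.2]))
      (1, ([] : List String))
    = ((n:Int) * ((n:Int) + 1) / 2 + 1,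
       (PySem.List.pyRange 1 ((n:Int) + 1) 1).map (fun i =>
         let start := PySem.Int.floordiv (i * (i - 1)) 2 + 1
         PySem.Str.join " * " ((PySem.List.pyRange start (start + i) 1).map PySem.Int.toStr))) := by
  induction n with
  | zero => simp [PySem.List.pyRange_one_eq_nil]
  | succ n ih =>
    have h1 : PySem.List.pyRange 1 (((n+1:Nat):Int) + 1) 1
        = PySem.List.pyRange 1 ((n:Int) + 1) 1 ++ [(n:Int) + 1] := by
      rw [show ((n+1:Nat):Int) + 1 = ((n:Int) + 1) + 1 by push_cast; ring,
          PySem.List.pyRange_one_succ_right (by omega)]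
    rw [h1, List.foldl_append, List.map_append, ih]
    simp only [List.foldl_cons, List.foldl_nil, List.map_cons, List.map_nil]
    have hfd : PySem.Int.floordiv (((n:Int)+1) * (((n:Int)+1) - 1)) 2 = (n:Int) * ((n:Int) + 1) / 2 := by
      rw [PySem.Int.floordiv_eq_ediv_of_pos (by omega)]
      congr 1
      ring
    have hin := inner_eq n ((n:Int) * ((n:Int) + 1) / 2 + 1)
    rw [hin]
    simp only [Prod.mk.injEq]
    constructor
    · push_cast
      have hq : ((n:Int)+1)*((n:Int)+1+1) = (n:Int)*((n:Int)+1) + 2*((n:Int)+1) := by ring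
      omega
    · rw [str_join_inter]
      simp only [hfd]

-- ===== VERDICT (by name: the statement is the Claim_ definition above) =====

theorem pattern_a_spec : Claim_equal_pattern_a := by
  intro rows _
  unfold Spec_pattern_a pattern_a pattern_a_alt
  by_cases h : 0 ≤ rows
  · obtain ⟨n, rfl⟩ := Int.eq_ofNat_of_zero_le h
    rw [outer_eq n]
  · rw [PySem.List.pyRange_one_eq_nil (by omega)]
    simp
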